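-- pv_equiv track=rewrite | github.com/shan-mathi/InterviewBit | all_thrice_excpet_one.py | all_thrice_excpet_one
-- ===== SOURCE A (Python) =====
-- def all_thrice_excpet_one(A):
--     ans=0
--
--     for i in reversed(range(32)):
--         count=0
--         for j in range(len(A)):
--             if A[j]&(1<<i):
--                 count+=1
--         if count%3!=0:
--             ans += 1<<i
--     return ans
-- ===== SOURCE B (Python) =====
-- def all_thrice_excpet_one(A):
--     MASK = 0xFFFFFFFF
--     ones = 0
--     twos = 0
--     for x in A:
--         x &= MASK
--         ones = (ones ^ x) & (MASK ^ twos)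
--         twos = (twos ^ x) & (MASK ^ ones)
--     return ones | twos
-- ===== Notes on version B (the rewrite author's own statement) =====
-- stated objective: faster
-- what changed: A scans the whole list once per bit (32 counting passes, one per bit position, each followed by a mod-3 test); B makes a single pass over the list keeping every bit's count-mod-3 simultaneously in two 32-bit words with the classic ones/twos XOR state machine and returns ones|twos.
import Mathlib
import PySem

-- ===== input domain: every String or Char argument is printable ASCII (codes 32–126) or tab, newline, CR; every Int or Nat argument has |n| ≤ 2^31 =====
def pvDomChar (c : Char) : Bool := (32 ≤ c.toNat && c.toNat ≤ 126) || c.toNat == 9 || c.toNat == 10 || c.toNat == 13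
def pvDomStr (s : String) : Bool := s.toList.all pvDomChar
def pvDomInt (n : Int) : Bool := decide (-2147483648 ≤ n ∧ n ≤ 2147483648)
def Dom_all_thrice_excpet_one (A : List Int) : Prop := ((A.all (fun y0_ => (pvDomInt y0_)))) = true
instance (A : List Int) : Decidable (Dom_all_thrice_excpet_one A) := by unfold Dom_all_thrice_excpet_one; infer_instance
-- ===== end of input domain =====

-- B replaces A's 32 per-bit counting passes over the list by a single pass that keeps
-- every bit's count-mod-3 in two 32-bit words (the ones/twos XOR state machine).

-- ===== PORT A =====
-- 'reversed(range(32))' is range(31, -1, -1); '1 << i' shifts by the Nat exponent i.toNat (i runs over 31..0, all nonnegative)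
def pvInner (A : List Int) (i : Int) : Int :=
  (PySem.List.pyRange 0 (A.length : Int) 1).foldl
    (fun c j => if PySem.Int.band (PySem.List.pyGetD A j 0) ((1 : Int) <<< i.toNat) ≠ 0 then c + 1 else c) 0

def pvBody (A : List Int) (ans i : Int) : Int :=
  if PySem.Int.mod (pvInner A i) 3 ≠ 0 then ans + ((1 : Int) <<< i.toNat) else ans

def all_thrice_excpet_one (A : List Int) : Int :=
  (PySem.List.pyRange 31 (-1) (-1)).foldl (pvBody A) 0

-- ===== PORT B =====
def pvMask : Int := 4294967295   -- 0xFFFFFFFF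

def pvStep (p : Int × Int) (x0 : Int) : Int × Int :=
  let x := PySem.Int.band x0 pvMask
  let o := PySem.Int.band (PySem.Int.bxor p.1 x) (PySem.Int.bxor pvMask p.2)
  let t := PySem.Int.band (PySem.Int.bxor p.2 x) (PySem.Int.bxor pvMask o)
  (o, t)

def all_thrice_excpet_one_alt (A : List Int) : Int :=
  let s := A.foldl pvStep (0, 0)
  PySem.Int.bor s.1 s.2

-- ===== PRECONDITION & SPEC =====
def Spec_all_thrice_excpet_one (A : List Int) (out : Int) : Prop := out = all_thrice_excpet_one_alt A
instance (A : List Int) (out : Int) : Decidable (Spec_all_thrice_excpet_one A out) := by unfold Spec_all_thrice_excpet_one; infer_instance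

-- ===== CLAIM (what is proved, stated in full; the proofs are below) =====
def Claim_equal_all_thrice_excpet_one : Prop := ∀ (A : List Int), Dom_all_thrice_excpet_one A → Spec_all_thrice_excpet_one A (all_thrice_excpet_one A)

-- ===== LEMMAS AND PROOFS =====

-- two bit-disjoint naturals add like their bitwise or
theorem pv_add_of_and_eq_zero (a : Nat) : ∀ b : Nat, a &&& b = 0 → a + b = a ||| b := by
  induction a using Nat.binaryRec with
  | zero => intro b _; simp
  | bit c a ih =>
    intro b h
    induction b using Nat.bitCasesOn with
    | bit d b' =>
      rw [Nat.land_bit] at h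
      rw [Nat.lor_bit]
      rcases Nat.bit_eq_zero_iff.mp h with ⟨h1, h2⟩
      have hab := ih b' h1
      cases c <;> cases d <;> simp only [Nat.bit_val, Bool.toNat_true, Bool.toNat_false, Bool.and_true, Bool.and_false, Bool.or_true, Bool.or_false, Bool.true_and, Bool.false_and, Bool.true_or, Bool.false_or] <;> first | omega | simp at h2

theorem pv_sub_and_eq_ldiff (m n : Nat) : m - (m &&& n) = Nat.ldiff m n := by
  have h0 : (m &&& n) &&& Nat.ldiff m n = 0 := by
    apply Nat.eq_of_testBit_eq
    intro i
    simp only [Nat.testBit_and, Nat.testBit_ldiff, Nat.zero_testBit]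
    cases m.testBit i <;> cases n.testBit i <;> rfl
  have h1 : (m &&& n) ||| Nat.ldiff m n = m := by
    apply Nat.eq_of_testBit_eq
    intro i
    simp only [Nat.testBit_or, Nat.testBit_and, Nat.testBit_ldiff]
    cases m.testBit i <;> cases n.testBit i <;> rfl
  have := pv_add_of_and_eq_zero (m &&& n) (Nat.ldiff m n) h0
  omega

theorem pv_band_eq_land (a b : Int) : PySem.Int.band a b = Int.land a b := by
  rcases a with m | m <;> rcases b with n | n <;>
    simp only [PySem.Int.band, Int.land] <;> norm_num [Int.negSucc_eq, pv_sub_and_eq_ldiff] <;> (intros; omega)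

theorem pv_ldiff_two_pow (m : Nat) (k : Nat) :
    Nat.ldiff (2 ^ k) m = if m.testBit k then 0 else 2 ^ k := by
  apply Nat.eq_of_testBit_eq
  intro i
  simp only [Nat.testBit_ldiff, Nat.testBit_two_pow]
  rcases eq_or_ne k i with rfl | hik
  · cases h : m.testBit k <;> simp [h, Nat.testBit_two_pow]
  · simp only [hik, decide_false, Bool.false_and]
    split <;> simp [Nat.testBit_two_pow, hik]

theorem pv_band_two_pow (a : Int) (k : Nat) :
    (PySem.Int.band a ((1 : Int) <<< k) ≠ 0) ↔ a.testBit k = true := by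
  have hsh : (1 : Int) <<< k = ((2 ^ k : Nat) : Int) := by
    show Int.shiftLeft 1 k = _
    simp [Int.shiftLeft, Nat.shiftLeft_eq]
  rw [hsh, pv_band_eq_land]
  rcases a with m | m
  · show (((m &&& 2 ^ k : Nat) : Int) ≠ 0) ↔ m.testBit k = true
    rw [Nat.and_two_pow]
    rcases h : m.testBit k <;> simp [h]
  · show ((Nat.ldiff (2 ^ k) m : Int) ≠ 0) ↔ (!m.testBit k) = true
    rw [pv_ldiff_two_pow]
    rcases h : m.testBit k <;> simp [h]

theorem pv_mask_eq : pvMask = (((2 ^ 32 - 1 : Nat) : Int)) := by norm_num [pvMask]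

theorem pv_band_mask (a : Int) :
    ∃ n : Nat, PySem.Int.band a pvMask = (n : Int) ∧
      ∀ i, n.testBit i = (decide (i < 32) && a.testBit i) := by
  rw [pv_mask_eq, pv_band_eq_land]
  rcases a with m | m
  · refine ⟨m &&& (2 ^ 32 - 1), rfl, fun i => ?_⟩
    rw [Nat.testBit_and, Nat.testBit_two_pow_sub_one]
    show _ = (decide (i < 32) && m.testBit i)
    exact Bool.and_comm _ _
  · refine ⟨Nat.ldiff (2 ^ 32 - 1) m, rfl, fun i => ?_⟩
    rw [Nat.testBit_ldiff, Nat.testBit_two_pow_sub_one]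
    rfl

def pvCnt (A : List Int) (i : Nat) : Nat := A.countP (fun a => a.testBit i)

def pvBitsum (A : List Int) : Nat → Nat
  | 0 => 0
  | k + 1 => pvBitsum A k + (if pvCnt A k % 3 ≠ 0 then 2 ^ k else 0)

theorem pv_bitsum_lt (A : List Int) (k : Nat) : pvBitsum A k < 2 ^ k := by
  induction k with
  | zero => simp [pvBitsum]
  | succ k ih =>
    have : (2:Nat) ^ (k+1) = 2 ^ k + 2 ^ k := by ring
    simp only [pvBitsum]
    split <;> omega

theorem pv_testBit_bitsum (A : List Int) (k : Nat) : ∀ i,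
    (pvBitsum A k).testBit i = (decide (i < k) && decide (pvCnt A i % 3 ≠ 0)) := by
  induction k with
  | zero => intro i; simp [pvBitsum]
  | succ k ih =>
    have hlt := pv_bitsum_lt A k
    have hbk : (pvBitsum A k).testBit k = false := Nat.testBit_eq_false_of_lt hlt
    intro i
    simp only [pvBitsum]
    by_cases hp : pvCnt A k % 3 ≠ 0
    · rw [if_pos hp]
      have hz : pvBitsum A k &&& 2 ^ k = 0 := by rw [Nat.and_two_pow, hbk]; simp
      rw [pv_add_of_and_eq_zero _ _ hz, Nat.testBit_or, Nat.testBit_two_pow, ih]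
      rcases eq_or_ne i k with rfl | hik
      · simp [hp]
      · have h1 : (i < k + 1) ↔ (i < k) := by omega
        simp [Ne.symm hik, h1]
    · rw [if_neg hp, Nat.add_zero, ih]
      rcases eq_or_ne i k with rfl | hik
      · simp [hp]
      · have h1 : (i < k + 1) ↔ (i < k) := by omega
        simp [h1]


theorem pv_inner_fold (k : Nat) (l : List Int) : ∀ c : Int,
    l.foldl (fun c a => if PySem.Int.band a ((1 : Int) <<< ((k : Int)).toNat) ≠ 0 then c + 1 else c) c
      = c + ((pvCnt l k : Nat) : Int) := by
  induction l with
  | nil => intro c; simp [pvCnt]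
  | cons x l ih =>
    intro c
    simp only [List.foldl_cons]
    rcases h : x.testBit k
    · have hb0 : PySem.Int.band x ((1 : Int) <<< k) = 0 := by
        by_contra hb
        exact absurd ((pv_band_two_pow x k).mp hb) (by simp [h])
      rw [if_neg (by simpa using hb0), ih]
      simp [pvCnt, List.countP_cons, h]
    · rw [if_pos (by simpa using (pv_band_two_pow x k).mpr h), ih]
      simp only [pvCnt, List.countP_cons, h, if_pos]
      push_cast
      ring

theorem pvInner_eq (A : List Int) (k : Nat) : pvInner A ((k : Nat) : Int) = ((pvCnt A k : Nat) : Int) := by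
  unfold pvInner
  rw [PySem.List.foldl_pyRange_zero_pyGetD' A 0
    (fun c a => if PySem.Int.band a ((1 : Int) <<< ((k : Int)).toNat) ≠ 0 then c + 1 else c) 0]
  rw [pv_inner_fold k A 0, zero_add]

theorem pv_mod3_cast (c : Nat) : PySem.Int.mod ((c : Nat) : Int) 3 = ((c % 3 : Nat) : Int) := by
  have := PySem.Int.mod_natCast c 3
  simpa using this

theorem pv_shift_one (k : Nat) : (1 : Int) <<< k = ((2 ^ k : Nat) : Int) := by
  show Int.shiftLeft 1 k = _
  simp [Int.shiftLeft, Nat.shiftLeft_eq]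

theorem pvBody_eq (A : List Int) (ans : Int) (k : Nat) :
    pvBody A ans ((k : Nat) : Int)
      = ans + (((if pvCnt A k % 3 ≠ 0 then 2 ^ k else 0 : Nat) : Nat) : Int) := by
  unfold pvBody
  rw [pvInner_eq, pv_mod3_cast]
  by_cases hp : pvCnt A k % 3 = 0
  · rw [if_neg (by simp [hp]), if_neg (by simp [hp])]
    simp
  · rw [if_pos (by exact_mod_cast hp), if_pos hp]
    simp only [Int.toNat_natCast, pv_shift_one]

theorem pv_outer (A : List Int) : ∀ (k : Nat) (c : Int),
    (PySem.List.pyRange ((k : Int) - 1) (-1) (-1)).foldl (pvBody A) c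
      = c + ((pvBitsum A k : Nat) : Int) := by
  intro k
  induction k with
  | zero => intro c; rw [PySem.List.pyRange_neg_one_eq_nil (by norm_num)]; simp [pvBitsum]
  | succ k ih =>
    intro c
    have hc : (((k + 1 : Nat) : Int)) - 1 = (k : Int) := by push_cast; ring
    rw [hc, PySem.List.pyRange_neg_one_cons (by omega), List.foldl_cons, pvBody_eq, ih]
    simp only [pvBitsum]
    by_cases hp : pvCnt A k % 3 = 0 <;> simp [hp] <;> push_cast <;> ring

theorem pv_a_eq (A : List Int) : all_thrice_excpet_one A = ((pvBitsum A 32 : Nat) : Int) := by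
  have h31 : (31 : Int) = ((32 : Nat) : Int) - 1 := by norm_num
  unfold all_thrice_excpet_one
  rw [h31, pv_outer A 32 0, zero_add]

theorem pv_step_bit (cnt : Nat) (b : Bool) :
    (((decide (cnt % 3 = 1) ^^ b) && !decide (cnt % 3 = 2)) = decide ((cnt + b.toNat) % 3 = 1))
    ∧ (((decide (cnt % 3 = 2) ^^ b) && !decide ((cnt + b.toNat) % 3 = 1)) = decide ((cnt + b.toNat) % 3 = 2)) := by
  have h3 : cnt % 3 = 0 ∨ cnt % 3 = 1 ∨ cnt % 3 = 2 := by omega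
  refine ⟨?_, ?_⟩ <;> cases b <;> rcases h3 with h | h | h <;>
    simp [Nat.add_mod, h]

theorem pv_loop_inv (l : List Int) :
    ∀ (C : Nat → Nat) (on tn : Nat),
      (∀ i, on.testBit i = (decide (i < 32) && decide (C i % 3 = 1))) →
      (∀ i, tn.testBit i = (decide (i < 32) && decide (C i % 3 = 2))) →
      ∃ (on' tn' : Nat), l.foldl pvStep ((on : Int), (tn : Int)) = (((on' : Nat) : Int), ((tn' : Nat) : Int)) ∧
        (∀ i, on'.testBit i = (decide (i < 32) && decide ((C i + pvCnt l i) % 3 = 1))) ∧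
        (∀ i, tn'.testBit i = (decide (i < 32) && decide ((C i + pvCnt l i) % 3 = 2))) := by
  induction l with
  | nil =>
    intro C on tn ho ht
    exact ⟨on, tn, rfl, by simpa [pvCnt] using ho, by simpa [pvCnt] using ht⟩
  | cons x l ih =>
    intro C on tn ho ht
    obtain ⟨xn, hx, hxb⟩ := pv_band_mask x
    have hstep : pvStep ((on : Int), (tn : Int)) x
        = ((((on ^^^ xn) &&& ((2 ^ 32 - 1) ^^^ tn) : Nat) : Int),
           (((tn ^^^ xn) &&& ((2 ^ 32 - 1) ^^^ ((on ^^^ xn) &&& ((2 ^ 32 - 1) ^^^ tn))) : Nat) : Int)) := by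
      simp only [pvStep, hx]
      simp only [pv_mask_eq, PySem.Int.bxor_natCast, PySem.Int.band_natCast]
    set on1 : Nat := (on ^^^ xn) &&& ((2 ^ 32 - 1) ^^^ tn) with hon1def
    set tn1 : Nat := (tn ^^^ xn) &&& ((2 ^ 32 - 1) ^^^ on1) with htn1def
    have hon1 : ∀ i, on1.testBit i
        = (decide (i < 32) && decide ((C i + (x.testBit i).toNat) % 3 = 1)) := by
      intro i
      rw [hon1def, Nat.testBit_and, Nat.testBit_xor, Nat.testBit_xor,
        Nat.testBit_two_pow_sub_one, ho, ht, hxb]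
      by_cases hi : i < 32
      · simp only [hi, decide_true, Bool.true_and, Bool.true_xor]
        exact (pv_step_bit (C i) (x.testBit i)).1
      · simp [hi]
    have htn1 : ∀ i, tn1.testBit i
        = (decide (i < 32) && decide ((C i + (x.testBit i).toNat) % 3 = 2)) := by
      intro i
      rw [htn1def, Nat.testBit_and, Nat.testBit_xor, Nat.testBit_xor,
        Nat.testBit_two_pow_sub_one, ht, hon1, hxb]
      by_cases hi : i < 32
      · simp only [hi, decide_true, Bool.true_and, Bool.true_xor]
        exact (pv_step_bit (C i) (x.testBit i)).2
      · simp [hi]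
    obtain ⟨on', tn', heq, hbo, hbt⟩ :=
      ih (fun j => C j + (x.testBit j).toNat) on1 tn1 hon1 htn1
    have hcnt : ∀ i, (C i + (x.testBit i).toNat) + pvCnt l i = C i + pvCnt (x :: l) i := by
      intro i
      simp only [pvCnt, List.countP_cons]
      cases h : x.testBit i <;> simp [h] <;> omega
    refine ⟨on', tn', ?_, fun i => ?_, fun i => ?_⟩
    · rw [List.foldl_cons, hstep, heq]
    · rw [hbo i, hcnt i]
    · rw [hbt i, hcnt i]

theorem pv_b_eq (A : List Int) :
    ∃ on tn : Nat, all_thrice_excpet_one_alt A = ((on ||| tn : Nat) : Int) ∧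
      (∀ i, on.testBit i = (decide (i < 32) && decide (pvCnt A i % 3 = 1))) ∧
      (∀ i, tn.testBit i = (decide (i < 32) && decide (pvCnt A i % 3 = 2))) := by
  obtain ⟨on, tn, heq, hbo, hbt⟩ :=
    pv_loop_inv A (fun _ => 0) 0 0 (by simp) (by simp)
  refine ⟨on, tn, ?_, by simpa using hbo, by simpa using hbt⟩
  unfold all_thrice_excpet_one_alt
  rw [show ((0 : Int), (0 : Int)) = (((0 : Nat) : Int), ((0 : Nat) : Int)) by norm_num, heq]
  simp [PySem.Int.bor_natCast]

-- ===== VERDICT (by name: the statement is the Claim_ definition above) =====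
theorem all_thrice_excpet_one_spec : Claim_equal_all_thrice_excpet_one := by
  intro A _
  unfold Spec_all_thrice_excpet_one
  obtain ⟨on, tn, hB, ho, ht⟩ := pv_b_eq A
  rw [pv_a_eq, hB]
  congr 1
  apply Nat.eq_of_testBit_eq
  intro i
  rw [Nat.testBit_or, ho, ht, pv_testBit_bitsum]
  have h3 : pvCnt A i % 3 < 3 := Nat.mod_lt _ (by norm_num)
  by_cases hi : i < 32
  · set r := pvCnt A i % 3 with hr
    interval_cases r <;> simp [hi]
  · simp [hi]
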